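-- pv_equiv track=rewrite | github.com/Gopal-next/Code | Array/Leetcode/020_calculate_money_1716.py | totalMoney
-- ===== SOURCE A (Python) =====
-- def totalMoney(n):
--     count = 0
--     i = 1
--     w =1
--     for day in range(1,n+1):
--         count += i
--         i += 1
--         if day%7==0:
--             w +=1
--             i = w
--     return count
-- ===== SOURCE B (Python) =====
-- def totalMoney(n):
--     if n <= 0:
--         return 0
--     q, r = n // 7, n % 7
--     return 28 * q + 7 * q * (q - 1) // 2 + r * q + r * (r + 1) // 2
-- ===== Notes on version B (the rewrite author's own statement) =====
-- stated objective: faster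
-- what changed: Replaced the day-by-day simulation loop with a closed-form arithmetic-series formula over full weeks plus the partial week.
import Mathlib
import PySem

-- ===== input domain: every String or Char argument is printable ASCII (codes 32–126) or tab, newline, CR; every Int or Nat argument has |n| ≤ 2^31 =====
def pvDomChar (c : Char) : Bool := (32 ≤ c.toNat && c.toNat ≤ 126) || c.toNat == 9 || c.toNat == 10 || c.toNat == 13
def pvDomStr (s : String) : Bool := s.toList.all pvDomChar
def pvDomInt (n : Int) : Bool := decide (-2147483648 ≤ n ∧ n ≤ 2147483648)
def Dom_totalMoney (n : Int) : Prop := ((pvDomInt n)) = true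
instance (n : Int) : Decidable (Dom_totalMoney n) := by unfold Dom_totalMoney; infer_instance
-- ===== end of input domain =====

-- B replaces A's day-by-day loop with a closed-form arithmetic-series formula (objective: faster, O(1) vs O(n)).


-- ===== PORT A =====
-- state (count, i, w); the for-loop over range(1, n+1) is a foldl over PySem.List.pyRange
def totalMoneyStep (s : Int × Int × Int) (day : Int) : Int × Int × Int :=
  -- count += i; i += 1; if day % 7 == 0: w += 1; i = w
  if PySem.Int.mod day 7 == 0 then (s.1 + s.2.1, s.2.2 + 1, s.2.2 + 1)
  else (s.1 + s.2.1, s.2.1 + 1, s.2.2)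

def totalMoney (n : Int) : Int :=
  ((PySem.List.pyRange 1 (n + 1) 1).foldl totalMoneyStep (0, 1, 1)).1

-- ===== PORT B =====
def totalMoney_alt (n : Int) : Int :=
  if n ≤ 0 then 0
  else
    let q := PySem.Int.floordiv n 7
    let r := PySem.Int.mod n 7
    28 * q + PySem.Int.floordiv (7 * q * (q - 1)) 2 + r * q
      + PySem.Int.floordiv (r * (r + 1)) 2

-- ===== PRECONDITION & SPEC =====
def Spec_totalMoney (n : Int) (out : Int) : Prop := out = totalMoney_alt n
instance (n : Int) (out : Int) : Decidable (Spec_totalMoney n out) := by unfold Spec_totalMoney; infer_instance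

-- ===== CLAIM (what is proved, stated in full; the proofs are below) =====
def Claim_equal_totalMoney : Prop := ∀ (n : Int), Dom_totalMoney n → Spec_totalMoney n (totalMoney n)

-- ===== LEMMAS AND PROOFS =====

-- closed form used in the loop invariant
def pvC (q r : Int) : Int := 28 * q + 7 * (q * (q - 1) / 2) + r * q + r * (r + 1) / 2

theorem pv_halfstep (q : Int) : (q + 1) * q / 2 = q * (q - 1) / 2 + q := by
  rw [show (q + 1) * q = q * (q - 1) + q * 2 by ring,
      Int.add_mul_ediv_right _ _ (by norm_num : (2:Int) ≠ 0)]

theorem pv_loopA (m : Nat) :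
    (PySem.List.pyRange 1 ((m : Int) + 1) 1).foldl totalMoneyStep (0, 1, 1)
      = (pvC ((m / 7 : Nat) : Int) ((m % 7 : Nat) : Int),
         ((m % 7 : Nat) : Int) + ((m / 7 : Nat) : Int) + 1,
         ((m / 7 : Nat) : Int) + 1) := by
  induction m with
  | zero =>
    rw [show ((0 : Nat) : Int) + 1 = 1 by norm_num,
        PySem.List.pyRange_one_eq_nil le_rfl]
    simp [pvC]
  | succ m ih =>
    have hcast : ((m + 1 : Nat) : Int) + 1 = (m : Int) + 1 + 1 := by push_cast; ring
    have hsplit : PySem.List.pyRange 1 ((m : Int) + 1 + 1) 1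
        = PySem.List.pyRange 1 ((m : Int) + 1) 1 ++ [(m : Int) + 1] :=
      PySem.List.pyRange_one_succ_right (by omega)
    have hmod : PySem.Int.mod ((m : Int) + 1) 7 = (((m + 1) % 7 : Nat) : Int) := by
      rw [show ((m : Int) + 1) = ((m + 1 : Nat) : Int) by push_cast; ring]
      exact_mod_cast PySem.Int.mod_natCast (m + 1) 7
    rw [hcast, hsplit, List.foldl_append, ih, List.foldl_cons, List.foldl_nil]
    simp only [totalMoneyStep, hmod]
    by_cases h : (m + 1) % 7 = 0
    · have hmz : (((m + 1) % 7 : Nat) : Int) = 0 := by exact_mod_cast h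
      have hq : (((m + 1) / 7 : Nat) : Int) = ((m / 7 : Nat) : Int) + 1 := by
        have : (m + 1) / 7 = m / 7 + 1 := by omega
        exact_mod_cast this
      have hr : ((m % 7 : Nat) : Int) = 6 := by
        have : m % 7 = 6 := by omega
        exact_mod_cast this
      rw [hmz, hq, hr, if_pos (by norm_num)]
      set q : Int := ((m / 7 : Nat) : Int) with hqdef
      have h1 : pvC q 6 + (6 + q + 1) = pvC (q + 1) 0 := by
        simp only [pvC]
        rw [show (q + 1) * (q + 1 - 1) = (q + 1) * q by ring, pv_halfstep]
        norm_num
        ring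
      rw [Prod.mk.injEq, Prod.mk.injEq]
      exact ⟨h1, by omega, by omega⟩
    · have hmnz : (((m + 1) % 7 : Nat) : Int) ≠ 0 := by
        simp only [ne_eq, Nat.cast_eq_zero]; exact h
      have hq : (((m + 1) / 7 : Nat) : Int) = ((m / 7 : Nat) : Int) := by
        have : (m + 1) / 7 = m / 7 := by omega
        exact_mod_cast this
      have hr : (((m + 1) % 7 : Nat) : Int) = ((m % 7 : Nat) : Int) + 1 := by
        have : (m + 1) % 7 = m % 7 + 1 := by omega
        exact_mod_cast this
      rw [if_neg (by simpa using hmnz), hq, hr]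
      set q : Int := ((m / 7 : Nat) : Int)
      set r : Int := ((m % 7 : Nat) : Int)
      have h1 : pvC q r + (r + q + 1) = pvC q (r + 1) := by
        simp only [pvC]
        rw [show (r + 1) * (r + 1 + 1) = ((r + 1) + 1) * (r + 1) by ring, pv_halfstep,
            show (r + 1) * (r + 1 - 1) = r * (r + 1) by ring]
        ring
      rw [Prod.mk.injEq, Prod.mk.injEq]
      exact ⟨h1, by omega, rfl⟩

theorem pv_even_pred (q : Int) : (2 : Int) ∣ q * (q - 1) := by
  rcases Int.even_or_odd q with he | ho
  · exact Dvd.dvd.mul_right he.two_dvd _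
  · obtain ⟨k, hk⟩ := ho
    exact Dvd.dvd.mul_left (⟨k, by omega⟩ : (2:Int) ∣ (q - 1)) _

theorem totalMoney_eq_alt (n : Int) : totalMoney n = totalMoney_alt n := by
  by_cases hn : n ≤ 0
  · rw [totalMoney, PySem.List.pyRange_one_eq_nil (a := 1) (b := n + 1) (by omega), totalMoney_alt, if_pos hn]
    rfl
  · rw [not_le] at hn
    obtain ⟨m, rfl⟩ : ∃ m : Nat, n = (m : Int) := ⟨n.toNat, (Int.toNat_of_nonneg (by omega)).symm⟩
    rw [totalMoney, pv_loopA, totalMoney_alt, if_neg (by omega)]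
    have hq : PySem.Int.floordiv (m : Int) 7 = ((m / 7 : Nat) : Int) := by
      exact_mod_cast PySem.Int.floordiv_natCast m 7
    have hr : PySem.Int.mod (m : Int) 7 = ((m % 7 : Nat) : Int) := by
      exact_mod_cast PySem.Int.mod_natCast m 7
    simp only [hq, hr]
    set q : Int := ((m / 7 : Nat) : Int)
    set r : Int := ((m % 7 : Nat) : Int)
    have h1 : PySem.Int.floordiv (7 * q * (q - 1)) 2 = 7 * (q * (q - 1) / 2) := by
      rw [PySem.Int.floordiv_eq_ediv_of_pos (by norm_num),
          show 7 * q * (q - 1) = 7 * (q * (q - 1)) by ring,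
          Int.mul_ediv_assoc 7 (pv_even_pred q)]
    have h2 : PySem.Int.floordiv (r * (r + 1)) 2 = r * (r + 1) / 2 := by
      rw [PySem.Int.floordiv_eq_ediv_of_pos (by norm_num)]
    simp only [h1, h2, pvC]

-- ===== VERDICT (by name: the statement is the Claim_ definition above) =====
theorem totalMoney_spec : Claim_equal_totalMoney := by
  intro n _
  exact totalMoney_eq_alt n
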